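-- pv_equiv track=rewrite | github.com/JohnnyArachnid/University | 2024-2025/Python/Lab5/Polys/polys.py | eq_poly
-- ===== SOURCE A (Python) =====
-- def is_zero(poly):
--     return all(x == 0 for x in poly)
--
-- def eq_poly(poly1, poly2):
--     if is_zero(poly1) and is_zero(poly2):
--         return True
--     if(len(poly1) > len(poly2)):
--         for indeks in range(len(poly2)):
--             if poly1[indeks] != poly2[indeks]:
--                 return False
--         if is_zero(poly1[len(poly2):]):
--             return True
--         return False
--     else:
--         for indeks in range(len(poly1)):
--             if poly1[indeks] != poly2[indeks]:
--                 return False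
--         if is_zero(poly2[len(poly1):]):
--             return True
--         return False
-- ===== SOURCE B (Python) =====
-- from itertools import zip_longest
--
-- def eq_poly(poly1, poly2):
--     return all(a == b for a, b in zip_longest(poly1, poly2, fillvalue=0))
-- ===== Notes on version B (the rewrite author's own statement) =====
-- stated objective: idiomatic
-- what changed: Replaced the length-comparison branching, index loop and separate tail is_zero scan by a single pass over the two sequences paired with itertools.zip_longest(fillvalue=0), returning whether every pair is equal.
import Mathlib
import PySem

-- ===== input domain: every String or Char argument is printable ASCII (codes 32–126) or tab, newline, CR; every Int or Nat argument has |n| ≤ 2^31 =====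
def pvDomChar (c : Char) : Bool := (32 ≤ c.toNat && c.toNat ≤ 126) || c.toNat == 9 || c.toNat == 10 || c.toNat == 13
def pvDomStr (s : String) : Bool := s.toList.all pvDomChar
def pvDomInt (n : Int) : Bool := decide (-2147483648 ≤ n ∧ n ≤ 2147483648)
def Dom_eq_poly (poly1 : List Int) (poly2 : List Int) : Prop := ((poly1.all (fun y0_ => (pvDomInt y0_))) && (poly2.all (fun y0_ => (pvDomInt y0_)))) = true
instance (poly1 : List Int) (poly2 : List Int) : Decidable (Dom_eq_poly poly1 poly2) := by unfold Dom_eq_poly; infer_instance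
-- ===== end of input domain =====

-- B replaces A's length-comparison branching, index loop and separate tail is_zero scan
-- by one pass over the two coefficient sequences zipped with fillvalue 0 (idiomatic, same cost).

-- ===== PORT A =====
-- all(x == 0 for x in poly)
def is_zero (poly : List Int) : Bool := poly.all (fun x => x == 0)

-- literal port of A; the index loops (range over the shorter length, early return False)
-- become .all over List.range; indices are in range there, so getD with default 0 is exact;
-- the slices poly[k:] with 0 ≤ k are List.drop
def eq_poly (poly1 : List Int) (poly2 : List Int) : Bool :=
  if is_zero poly1 && is_zero poly2 then true
  else if poly1.length > poly2.length then
    if (List.range poly2.length).all (fun i => poly1.getD i 0 == poly2.getD i 0) then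
      is_zero (List.drop poly2.length poly1)
    else false
  else
    if (List.range poly1.length).all (fun i => poly1.getD i 0 == poly2.getD i 0) then
      is_zero (List.drop poly1.length poly2)
    else false

-- ===== PORT B =====
-- zip_longest(poly1, poly2, fillvalue=0) with an element-wise == check, as structural recursion
def padEq : List Int → List Int → Bool
  | [], [] => true
  | [], b :: bs => (0 == b) && padEq [] bs
  | a :: as, [] => (a == 0) && padEq as []
  | a :: as, b :: bs => (a == b) && padEq as bs

def eq_poly_alt (poly1 : List Int) (poly2 : List Int) : Bool := padEq poly1 poly2

-- ===== PRECONDITION & SPEC =====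
def Spec_eq_poly (poly1 : List Int) (poly2 : List Int) (out : Bool) : Prop := out = eq_poly_alt poly1 poly2
instance (poly1 : List Int) (poly2 : List Int) (out : Bool) : Decidable (Spec_eq_poly poly1 poly2 out) := by unfold Spec_eq_poly; infer_instance

-- ===== CLAIM (what is proved, stated in full; the proofs are below) =====
def Claim_equal_eq_poly : Prop := ∀ (poly1 : List Int) (poly2 : List Int), Dom_eq_poly poly1 poly2 → Spec_eq_poly poly1 poly2 (eq_poly poly1 poly2)

-- ===== LEMMAS AND PROOFS =====

-- ===== VERDICT (by name: the statement is the Claim_ definition above) =====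
-- characterisation shared by both ports: equality of all 0-padded coefficients
lemma padEq_iff : ∀ (p1 p2 : List Int), padEq p1 p2 = true ↔ ∀ i, p1.getD i 0 = p2.getD i 0 := by
  intro p1
  induction p1 with
  | nil =>
    intro p2
    induction p2 with
    | nil => simp [padEq]
    | cons b bs ih =>
      simp only [padEq, Bool.and_eq_true, ih, beq_iff_eq, List.getD_nil]
      constructor
      · rintro ⟨hb, h⟩ i
        cases i with
        | zero => simpa using hb
        | succ n => simpa using h n
      · intro h
        exact ⟨by simpa using h 0, fun i => by simpa using h (i + 1)⟩
  | cons a as ih =>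
    intro p2
    cases p2 with
    | nil =>
      simp only [padEq, Bool.and_eq_true, ih, beq_iff_eq, List.getD_nil]
      constructor
      · rintro ⟨ha, h⟩ i
        cases i with
        | zero => simpa using ha
        | succ n => simpa using h n
      · intro h
        exact ⟨by simpa using h 0, fun i => by simpa using h (i + 1)⟩
    | cons b bs =>
      simp only [padEq, Bool.and_eq_true, ih, beq_iff_eq]
      constructor
      · rintro ⟨hab, h⟩ i
        cases i with
        | zero => simpa using hab
        | succ n => simpa using h n
      · intro h
        exact ⟨by simpa using h 0, fun i => by simpa using h (i + 1)⟩

lemma is_zero_iff (p : List Int) : is_zero p = true ↔ ∀ i, p.getD i 0 = 0 := by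
  simp only [is_zero, List.all_eq_true, beq_iff_eq]
  constructor
  · intro h i
    by_cases hi : i < p.length
    · rw [p.getD_eq_getElem 0 hi]
      exact h _ (p.getElem_mem hi)
    · exact p.getD_eq_default 0 (by omega)
  · intro h x hx
    obtain ⟨i, hi, rfl⟩ := List.mem_iff_getElem.mp hx
    rw [← p.getD_eq_getElem 0 hi]
    exact h i

lemma getD_drop (p : List Int) (k i : Nat) :
    (List.drop k p).getD i 0 = p.getD (k + i) 0 := by
  simp [List.getD_eq_getElem?_getD, List.getElem?_drop]

-- the (prefix-equal ∧ tail-of-the-longer-is-zero) shape of A's two branches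
lemma branch_iff (p q : List Int) :
    (((List.range q.length).all (fun i => p.getD i 0 == q.getD i 0)) &&
      is_zero (List.drop q.length p)) = true ↔ ∀ i, p.getD i 0 = q.getD i 0 := by
  simp only [Bool.and_eq_true, List.all_eq_true, List.mem_range, beq_iff_eq, is_zero_iff,
    getD_drop]
  constructor
  · rintro ⟨hpre, htail⟩ i
    by_cases hi : i < q.length
    · exact hpre i hi
    · rw [q.getD_eq_default 0 (by omega)]
      have := htail (i - q.length)
      rwa [Nat.add_sub_cancel' (by omega)] at this
  · intro h
    refine ⟨fun i _ => h i, fun i => ?_⟩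
    rw [h (q.length + i)]
    exact q.getD_eq_default 0 (by omega)

lemma beq_swap (x y : Int) : (x == y) = (y == x) := by
  by_cases h : x = y <;> simp [h, eq_comm]

lemma eq_poly_iff : ∀ (p1 p2 : List Int), eq_poly p1 p2 = true ↔ ∀ i, p1.getD i 0 = p2.getD i 0 := by
  intro p1 p2
  unfold eq_poly
  by_cases h1 : (is_zero p1 && is_zero p2) = true
  · rw [if_pos h1]
    simp only [Bool.and_eq_true, is_zero_iff] at h1
    simp only [true_iff]
    intro i
    rw [h1.1 i, h1.2 i]
  · rw [if_neg h1]
    by_cases h2 : p1.length > p2.length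
    · rw [if_pos h2]
      have hb := branch_iff p1 p2
      cases hc : ((List.range p2.length).all fun i => p1.getD i 0 == p2.getD i 0) <;>
        simp only [hc, Bool.false_and, Bool.true_and, if_true, if_false,
          Bool.false_eq_true, false_iff] at hb ⊢ <;>
        simpa using hb
    · rw [if_neg h2]
      have hb := branch_iff p2 p1
      have hsymm : (∀ i, p2.getD i 0 = p1.getD i 0) ↔ ∀ i, p1.getD i 0 = p2.getD i 0 :=
        ⟨fun h i => (h i).symm, fun h i => (h i).symm⟩
      have hswap : (fun i => p1.getD i 0 == p2.getD i 0) =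
          (fun i => p2.getD i 0 == p1.getD i 0) := by
        funext i; exact beq_swap _ _
      rw [hswap, ← hsymm]
      cases hc : ((List.range p1.length).all fun i => p2.getD i 0 == p1.getD i 0) <;>
        simp only [hc, Bool.false_and, Bool.true_and, if_true, if_false,
          Bool.false_eq_true, false_iff] at hb ⊢ <;>
        simpa using hb

theorem eq_poly_spec : Claim_equal_eq_poly := by
  intro p1 p2 _
  unfold Spec_eq_poly eq_poly_alt
  rw [Bool.eq_iff_iff, eq_poly_iff, padEq_iff]
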